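-- pv_equiv track=rewrite | github.com/lordstone/shua_python | shortest_completing_word.py | find
-- ===== SOURCE A (Python) =====
-- import collections
--
-- def find(target, words):
--     ctr = collections.Counter(filter(str.isalpha, target.lower()))
--     length = sum(ctr.values())
--     d = dict(ctr)
--     best = None
--     for i, word in enumerate(words):
--         if len(word) < length or (best is not None and len(word) >= len(words[best])):
--             continue
--         dd = d.copy()
--         for c in word:
--             if c in dd:
--                 dd[c] -= 1
--                 if dd[c] == 0:
--                     del dd[c]
--         if len(dd) == 0:
--             best = i
--     return words[best] if best is not None else None
-- ===== SOURCE B (Python) =====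
-- def find(target, words):
--     need = sorted(c for c in target.lower() if c.isalpha())
--     def completes(w):
--         i = 0
--         for c in sorted(w):
--             if i < len(need) and c == need[i]:
--                 i += 1
--         return i == len(need)
--     for w in sorted(words, key=len):
--         if completes(w):
--             return w
--     return None
-- ===== Notes on version B (the rewrite author's own statement) =====
-- stated objective: alternative
-- what changed: A's pruned single-pass running-best index scan with a mutating letter-count dict is replaced by staged passes: sort the target's letters once, stably sort the words by length, and return the first word whose sorted letters contain the sorted target letters as a subsequence (a greedy two-pointer merge instead of any counting dict).
import Mathlib
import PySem

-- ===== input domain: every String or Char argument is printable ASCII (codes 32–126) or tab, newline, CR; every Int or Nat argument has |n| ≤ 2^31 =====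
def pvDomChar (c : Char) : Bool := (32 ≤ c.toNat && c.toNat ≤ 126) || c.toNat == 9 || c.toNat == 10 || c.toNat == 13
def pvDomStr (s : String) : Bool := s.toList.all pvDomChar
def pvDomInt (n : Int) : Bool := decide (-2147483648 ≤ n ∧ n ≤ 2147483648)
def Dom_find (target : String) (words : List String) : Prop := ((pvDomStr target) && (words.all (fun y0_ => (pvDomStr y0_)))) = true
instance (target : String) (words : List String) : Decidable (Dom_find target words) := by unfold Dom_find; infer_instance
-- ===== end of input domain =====

-- B replaces A's pruned running-best scan with a mutating letter-count dict by staged passes: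
-- sort the target's letters, stably sort the words by length, and return the first word whose
-- sorted letters contain the sorted target letters as a subsequence (greedy two-pointer merge).

-- ===== PORT A =====
def find (target : String) (words : List String) : Option String :=
  let ctr := PySem.Dict.counter (((PySem.Str.lower target).toList).filter PySem.Chars.isalpha)
  let length := ctr.values.sum
  let d := ctr   -- dict(ctr): the same key/value mapping
  let best := (PySem.List.enumerate words).foldl (fun best iw =>
      -- the `.getD ""` below is only evaluated under `best.isSome`, where the stored index is in range
      if decide (PySem.Str.len iw.2 < length) ||
         (best.isSome && decide (PySem.Str.len iw.2 ≥ PySem.Str.len ((PySem.List.pyGet? words (best.getD 0)).getD ""))) then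
        best
      else
        let dd := iw.2.toList.foldl (fun dd c =>
            if dd.contains c then
              let dd1 := dd.modify c 0 (· - 1)
              if dd1.getD c 0 = 0 then dd1.erase c else dd1
            else dd) d
        if dd.size = 0 then some iw.1 else best) none
  match best with
  | some b => PySem.List.pyGet? words b
  | none => none

-- ===== PORT B =====
def find_alt (target : String) (words : List String) : Option String :=
  let need := PySem.List.sorted (((PySem.Str.lower target).toList).filter PySem.Chars.isalpha) (fun c => c)
  let completes := fun (w : String) =>
    decide ((PySem.List.sorted w.toList (fun c => c)).foldl
      (fun (i : Int) c => if i < (need.length : Int) ∧ PySem.List.pyGet? need i = some c then i + 1 else i) 0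
      = (need.length : Int))
  (PySem.List.sorted words (fun w => PySem.Str.len w)).find? completes

-- ===== PRECONDITION & SPEC =====
def Spec_find (target : String) (words : List String) (out : Option String) : Prop := out = find_alt target words
instance (target : String) (words : List String) (out : Option String) : Decidable (Spec_find target words out) := by unfold Spec_find; infer_instance

-- ===== CLAIM (what is proved, stated in full; the proofs are below) =====
def Claim_equal_find : Prop := ∀ (target : String) (words : List String), Dom_find target words → Spec_find target words (find target words)

-- ===== LEMMAS AND PROOFS =====

-- the multiset of letters A/B count
def pvT (target : String) : List Char := ((PySem.Str.lower target).toList).filter PySem.Chars.isalpha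

-- pure notion of "word completes target"
def pvCompl (t w : List Char) : Prop := ∀ c ∈ t, t.count c ≤ w.count c

-- A's inner consumption step
def pvF (dd : PySem.Dict Char Int) (c : Char) : PySem.Dict Char Int :=
  if dd.contains c then
    let dd1 := dd.modify c 0 (· - 1)
    if dd1.getD c 0 = 0 then dd1.erase c else dd1
  else dd

-- invariant value of the consumed dict
def pvRem (t pre : List Char) (k : Char) : Option Int :=
  if pre.count k < t.count k then some ((t.count k : Int) - pre.count k) else none

-- A's outer-loop step (over enumerated words), and its word-level mirror
def pvGA (words : List String) (len_ : Int) (d : PySem.Dict Char Int)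
    (best : Option Int) (iw : Int × String) : Option Int :=
  if decide (PySem.Str.len iw.2 < len_) ||
     (best.isSome && decide (PySem.Str.len iw.2 ≥ PySem.Str.len ((PySem.List.pyGet? words (best.getD 0)).getD ""))) then
    best
  else
    if (iw.2.toList.foldl pvF d).size = 0 then some iw.1 else best

def pvG2 (len_ : Int) (d : PySem.Dict Char Int) (m : Option String) (w : String) : Option String :=
  if decide (PySem.Str.len w < len_) ||
     (m.isSome && decide (PySem.Str.len w ≥ PySem.Str.len (m.getD ""))) then
    m
  else
    if (w.toList.foldl pvF d).size = 0 then some w else m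

-- running first-minimum step (strict improvement; keeps the earlier word on ties)
def pvMinStep (m : Option String) (w : String) : Option String :=
  match m with
  | none => some w
  | some x => if PySem.Str.len w < PySem.Str.len x then some w else some x

def pvSel (p : String → Bool) (m : Option String) (w : String) : Option String :=
  if p w then pvMinStep m w else m

-- B's completing test (greedy merge of sorted target letters into sorted word letters)
def pvCB (t : List Char) (w : String) : Bool :=
  let need := PySem.List.sorted t (fun c => c)
  decide ((PySem.List.sorted w.toList (fun c => c)).foldl
    (fun (i : Int) c => if i < (need.length : Int) ∧ PySem.List.pyGet? need i = some c then i + 1 else i) 0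
    = (need.length : Int))

-- the greedy step on a Nat index
def pvStepN (need : List Char) (i : Nat) (c : Char) : Nat :=
  if i < need.length ∧ need[i]? = some c then i + 1 else i

-- relation between A's best index and B's running word
def pvRel (words : List String) (b : Option Int) (m : Option String) : Prop :=
  match b, m with
  | none, none => True
  | some j, some x => PySem.List.pyGet? words j = some x
  | _, _ => False

theorem pv_count_append_self (pre : List Char) (c : Char) :
    (pre ++ [c]).count c = pre.count c + 1 := by
  simp [List.count_append]

theorem pv_count_append_ne (pre : List Char) (c k : Char) (hkc : k ≠ c) :
    (pre ++ [c]).count k = pre.count k := by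
  simp [List.count_append, List.count_singleton']
  exact fun e => hkc e.symm

theorem pvRem_append_ne (t pre : List Char) (c k : Char) (hkc : k ≠ c) :
    pvRem t (pre ++ [c]) k = pvRem t pre k := by
  simp [pvRem, pv_count_append_ne pre c k hkc]

theorem pv_find?_filter {α : Type} (p q : α → Bool) (h : ∀ x, p x = true → q x = true) :
    ∀ l : List α, (l.filter q).find? p = l.find? p := by
  intro l
  induction l with
  | nil => rfl
  | cons a l ih =>
      by_cases hq : q a = true
      · by_cases hp : p a = true
        · simp [hq, hp]
        · simp only [List.filter_cons, hq, if_true, List.find?_cons]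
          simp [hp, ih]
      · have hp : p a = false := by
          cases hpa : p a with
          | false => rfl
          | true => exact absurd (h a hpa) hq
        simp [hq, hp, ih]

theorem pv_get?_erase {ν : Type} (d : PySem.Dict Char ν) (c k : Char) :
    (d.erase c).get? k = if k = c then none else d.get? k := by
  by_cases hk : k = c
  · subst hk
    simp only [PySem.Dict.erase, PySem.Dict.get?]
    rw [List.find?_eq_none.mpr]
    · rfl
    · intro x hx
      have hx2 := List.of_mem_filter hx
      simp at hx2 ⊢
      exact hx2
  · simp only [PySem.Dict.erase, PySem.Dict.get?, hk, if_false]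
    rw [pv_find?_filter]
    intro x hx
    simp at hx ⊢
    rw [hx]
    exact hk

theorem pv_get?_counter (t : List Char) (k : Char) :
    (PySem.Dict.counter t).get? k = pvRem t [] k := by
  have hc := PySem.Dict.contains_eq_isSome_get? (PySem.Dict.counter t) k
  rw [PySem.Dict.contains_counter] at hc
  have hd := PySem.Dict.getD_counter t k
  rw [PySem.Dict.getD_eq_get?_getD] at hd
  unfold pvRem
  cases h : (PySem.Dict.counter t).get? k with
  | none =>
      rw [h] at hc hd
      simp at hc
      simp [List.count_eq_zero_of_not_mem hc]
  | some v =>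
      rw [h] at hc hd
      simp at hc hd
      subst hd
      have : 0 < t.count k := List.count_pos_iff.mpr hc
      simp [this]

theorem pv_step_rem (t pre : List Char) (c : Char) (dd : PySem.Dict Char Int)
    (h : ∀ k, dd.get? k = pvRem t pre k) :
    ∀ k, (pvF dd c).get? k = pvRem t (pre ++ [c]) k := by
  intro k
  have hcont : dd.contains c = (pvRem t pre c).isSome := by
    rw [PySem.Dict.contains_eq_isSome_get?, h]
  unfold pvF
  by_cases hc : pre.count c < t.count c
  · have hsome : dd.contains c = true := by rw [hcont]; simp [pvRem, hc]
    rw [hsome]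
    simp only [if_true]
    have hgd : dd.getD c 0 = (t.count c : Int) - pre.count c := by
      rw [PySem.Dict.getD_eq_get?_getD, h, pvRem, if_pos hc]; rfl
    have hmod : dd.modify c 0 (· - 1) = dd.insert c ((t.count c : Int) - pre.count c - 1) := by
      simp [PySem.Dict.modify, hgd]
    rw [hmod]
    have hgd1 : (dd.insert c ((t.count c : Int) - pre.count c - 1)).getD c 0
        = (t.count c : Int) - pre.count c - 1 := by
      rw [PySem.Dict.getD_eq_get?_getD, PySem.Dict.get?_insert]; simp
    rw [hgd1]
    by_cases hz : (t.count c : Int) - pre.count c - 1 = 0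
    · rw [if_pos hz, pv_get?_erase]
      by_cases hkc : k = c
      · subst hkc
        have hnlt : ¬ (pre ++ [k]).count k < t.count k := by
          rw [pv_count_append_self]; omega
        simp only [pvRem]
        rw [if_neg hnlt]
        simp
      · rw [if_neg hkc, PySem.Dict.get?_insert, if_neg hkc, h, pvRem_append_ne t pre c k hkc]
    · rw [if_neg hz, PySem.Dict.get?_insert]
      by_cases hkc : k = c
      · subst hkc
        have hlt : (pre ++ [k]).count k < t.count k := by
          rw [pv_count_append_self]; omega
        rw [if_pos rfl, pvRem, if_pos hlt, pv_count_append_self]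
        push_cast
        ring_nf
      · rw [if_neg hkc, h, pvRem_append_ne t pre c k hkc]
  · have hnone : dd.contains c = false := by rw [hcont]; simp [pvRem, hc]
    rw [hnone]
    simp only [Bool.false_eq_true, if_false]
    rw [h]
    by_cases hkc : k = c
    · subst hkc
      have h2 : ¬ (pre ++ [k]).count k < t.count k := by
        rw [pv_count_append_self]; omega
      simp only [pvRem]
      rw [if_neg hc, if_neg h2]
    · rw [pvRem_append_ne t pre c k hkc]

theorem pv_fold_rem (t : List Char) : ∀ (cs pre : List Char) (dd : PySem.Dict Char Int),
    (∀ k, dd.get? k = pvRem t pre k) →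
    ∀ k, (cs.foldl pvF dd).get? k = pvRem t (pre ++ cs) k := by
  intro cs
  induction cs with
  | nil => intro pre dd h k; simpa using h k
  | cons c cs ih =>
      intro pre dd h k
      have := ih (pre ++ [c]) (pvF dd c) (pv_step_rem t pre c dd h) k
      simpa using this

theorem pv_size_zero_iff (dd : PySem.Dict Char Int) :
    dd.size = 0 ↔ ∀ k, dd.get? k = none := by
  constructor
  · intro h k
    have : dd.items = [] := List.length_eq_zero_iff.mp h
    simp [PySem.Dict.get?, this]
  · intro h
    cases hi : dd.items with
    | nil => simp [PySem.Dict.size, hi]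
    | cons p rest =>
        exfalso
        have := h p.1
        simp [PySem.Dict.get?, hi] at this

theorem pv_rem_none_iff (t w : List Char) :
    (∀ k, pvRem t w k = none) ↔ pvCompl t w := by
  constructor
  · intro h c hm
    have := h c
    simp [pvRem] at this
    omega
  · intro h k
    by_cases hk : k ∈ t
    · have := h k hk
      simp [pvRem]
      omega
    · simp [pvRem, List.count_eq_zero_of_not_mem hk]

theorem pv_completesA_iff (t : List Char) (w : String) :
    ((w.toList.foldl pvF (PySem.Dict.counter t)).size = 0) ↔ pvCompl t w.toList := by
  have hfr : ∀ k, (w.toList.foldl pvF (PySem.Dict.counter t)).get? k = pvRem t w.toList k := by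
    intro k
    have := pv_fold_rem t w.toList [] (PySem.Dict.counter t) (pv_get?_counter t) k
    simpa using this
  rw [pv_size_zero_iff, ← pv_rem_none_iff]
  exact forall_congr' (fun k => by rw [hfr k])

-- the Int-indexed greedy fold is the Nat-indexed one
theorem pv_fold_int_nat (need : List Char) : ∀ (cs : List Char) (i : Nat),
    cs.foldl (fun (i : Int) c => if i < (need.length : Int) ∧ PySem.List.pyGet? need i = some c then i + 1 else i) (i : Int)
      = ((cs.foldl (pvStepN need) i : Nat) : Int) := by
  intro cs
  induction cs with
  | nil => intro i; rfl
  | cons c cs ih =>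
      intro i
      simp only [List.foldl_cons]
      have hstep : (if (i : Int) < (need.length : Int) ∧ PySem.List.pyGet? need (i : Int) = some c then (i : Int) + 1 else (i : Int))
          = ((pvStepN need i c : Nat) : Int) := by
        unfold pvStepN
        rw [PySem.List.pyGet?_natCast]
        by_cases h : i < need.length ∧ need[i]? = some c
        · rw [if_pos, if_pos h]
          · push_cast; ring
          · exact ⟨by exact_mod_cast h.1, h.2⟩
        · rw [if_neg, if_neg h]
          intro hc
          exact h ⟨by exact_mod_cast hc.1, hc.2⟩
      rw [hstep, ih]

-- the greedy merge decides whether the remaining target suffix is a subsequence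
theorem pv_greedy (need : List Char) : ∀ (w : List Char) (i : Nat), i ≤ need.length →
    ((w.foldl (pvStepN need) i = need.length) ↔ (need.drop i).isSublist w = true) := by
  intro w
  induction w with
  | nil =>
      intro i hi
      simp only [List.foldl_nil]
      cases hd : need.drop i with
      | nil =>
          have : i = need.length := by
            have := List.drop_eq_nil_iff.mp hd
            omega
          simp [this, List.isSublist]
      | cons a l =>
          have hlt : i < need.length := by
            by_contra h
            rw [List.drop_eq_nil_iff.mpr (by omega)] at hd
            simp at hd
          simp [List.isSublist]
          omega
  | cons c w ih =>
      intro i hi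
      simp only [List.foldl_cons]
      by_cases hlt : i < need.length
      · rw [List.drop_eq_getElem_cons hlt]
        by_cases he : need[i] = c
        · have hcond : pvStepN need i c = i + 1 := by
            unfold pvStepN
            rw [if_pos ⟨hlt, by rw [List.getElem?_eq_getElem hlt, he]⟩]
          rw [hcond]
          have : (need[i] :: need.drop (i + 1)).isSublist (c :: w) = (need.drop (i + 1)).isSublist w := by
            simp [List.isSublist, he]
          rw [this]
          exact ih (i + 1) (by omega)
        · have hcond : pvStepN need i c = i := by
            unfold pvStepN
            rw [if_neg]
            intro hc
            rw [List.getElem?_eq_getElem hlt] at hc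
            exact he (Option.some.injEq _ _ ▸ hc.2)
          rw [hcond]
          have : (need[i] :: need.drop (i + 1)).isSublist (c :: w)
              = (need[i] :: need.drop (i + 1)).isSublist w := by
            simp [List.isSublist, he]
          rw [this, ← List.drop_eq_getElem_cons hlt]
          exact ih i hi
      · have hieq : i = need.length := by omega
        have hcond : pvStepN need i c = i := by
          unfold pvStepN
          rw [if_neg]
          intro hc
          omega
        rw [hcond]
        subst hieq
        simp only [List.drop_length]
        rw [List.isSublist]
        have := ih need.length (le_refl _)
        rw [List.drop_length] at this
        rw [this, List.isSublist]

-- B's test decides multiset inclusion of the target letters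
theorem pv_completesB_iff (t : List Char) (w : String) :
    (pvCB t w = true) ↔ pvCompl t w.toList := by
  unfold pvCB
  have h0 : ((0 : Int)) = ((0 : Nat) : Int) := rfl
  rw [decide_eq_true_iff, h0, pv_fold_int_nat]
  rw [Int.natCast_inj]
  rw [pv_greedy (PySem.List.sorted t (fun c => c)) (PySem.List.sorted w.toList (fun c => c)) 0 (Nat.zero_le _)]
  rw [List.drop_zero, List.isSublist_iff_sublist]
  have hpt : (PySem.List.sorted t (fun c => c)).Perm t := PySem.List.sorted_perm t (fun c => c) false
  have hpw : (PySem.List.sorted w.toList (fun c => c)).Perm w.toList :=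
    PySem.List.sorted_perm w.toList (fun c => c) false
  constructor
  · intro hsub c hc
    have hcount := hsub.subperm.count_le c
    rw [hpt.count_eq, hpw.count_eq] at hcount
    exact hcount
  · intro hcompl
    have hsp : (PySem.List.sorted t (fun c => c)).Subperm (PySem.List.sorted w.toList (fun c => c)) := by
      rw [List.subperm_ext_iff]
      intro x hx
      rw [hpt.count_eq, hpw.count_eq]
      exact hcompl x (hpt.mem_iff.mp hx)
    exact List.sublist_of_subperm_of_pairwise hsp
      (PySem.List.sorted_pairwise t (fun c => c))
      (PySem.List.sorted_pairwise w.toList (fun c => c))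

theorem pv_prune (t : List Char) (w : String) (h : pvCompl t w.toList) :
    ((PySem.Dict.counter t).values.sum : Int) ≤ PySem.Str.len w := by
  have hsub : t.Subperm w.toList := List.subperm_ext_iff.mpr (fun x hx => h x hx)
  have hlen : t.length ≤ w.toList.length := hsub.length_le
  have hv : (PySem.Dict.counter t).values = (PySem.Set.ofList t).map (fun k => (t.count k : Int)) := by
    simp only [PySem.Dict.values, PySem.Dict.items_counter, List.map_map]
    rfl
  have hperm : (PySem.Set.ofList t).Perm t.dedup := by
    rw [List.perm_ext_iff_of_nodup (PySem.Set.nodup_ofList t) t.nodup_dedup]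
    intro a
    rw [PySem.Set.mem_ofList, List.mem_dedup]
  have hsum : ((PySem.Set.ofList t).map (fun k => t.count k)).sum = t.length := by
    rw [(hperm.map (fun k => t.count k)).sum_eq]
    exact List.sum_map_count_dedup_eq_length t
  rw [hv]
  have hcast : ((PySem.Set.ofList t).map (fun k => (t.count k : Int))).sum
      = (((PySem.Set.ofList t).map (fun k => t.count k)).sum : Int) := by
    push_cast
    simp [Function.comp_def]
  rw [hcast, hsum]
  unfold PySem.Str.len
  exact_mod_cast hlen

theorem pv_enumerate_map_snd {α : Type} : ∀ (l : List α) (s : Int),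
    (PySem.List.enumerate l s).map (·.2) = l := by
  intro l
  induction l with
  | nil => intro s; rfl
  | cons a l ih => intro s; simp [PySem.List.enumerate, ih]

theorem pv_mem_enumerate {α : Type} : ∀ (l pre : List α) (p : Int × α),
    p ∈ PySem.List.enumerate l (pre.length : Int) →
    PySem.List.pyGet? (pre ++ l) p.1 = some p.2 := by
  intro l
  induction l with
  | nil => intro pre p hp; simp [PySem.List.enumerate] at hp
  | cons a l ih =>
      intro pre p hp
      simp only [PySem.List.enumerate, List.mem_cons] at hp
      rcases hp with h | h
      · subst h
        rw [PySem.List.pyGet?_natCast]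
        simp
      · have := ih (pre ++ [a]) p (by
          have hl : ((pre ++ [a]).length : Int) = (pre.length : Int) + 1 := by simp
          rw [hl]; exact h)
        simpa using this

theorem pv_loopA (words : List String) (len_ : Int) (d : PySem.Dict Char Int) :
    ∀ (l : List (Int × String)) (b : Option Int) (m : Option String),
      (∀ p ∈ l, PySem.List.pyGet? words p.1 = some p.2) →
      pvRel words b m →
      pvRel words (l.foldl (pvGA words len_ d) b) (l.foldl (fun m p => pvG2 len_ d m p.2) m) := by
  intro l
  induction l with
  | nil => intro b m _ hrel; exact hrel
  | cons p l ih =>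
      intro b m hl hrel
      simp only [List.foldl_cons]
      apply ih
      · intro q hq; exact hl q (List.mem_cons_of_mem p hq)
      · -- one step preserves the relation
        have hp : PySem.List.pyGet? words p.1 = some p.2 := hl p List.mem_cons_self
        unfold pvGA pvG2
        match b, m, hrel with
        | none, none, _ =>
            simp only [Option.isSome_none, Bool.false_and, Bool.or_false]
            by_cases h1 : decide (PySem.Str.len p.2 < len_) = true
            · rw [if_pos h1, if_pos h1]; trivial
            · rw [if_neg h1, if_neg h1]
              by_cases h2 : (p.2.toList.foldl pvF d).size = 0
              · rw [if_pos h2, if_pos h2]; exact hp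
              · rw [if_neg h2, if_neg h2]; trivial
        | some j, some x, hjx =>
            have hjx' : PySem.List.pyGet? words j = some x := hjx
            simp only [Option.isSome_some, Bool.true_and, Option.getD_some, hjx',
              Bool.or_eq_true, decide_eq_true_eq]
            split_ifs <;> first
              | exact hjx
              | exact hp

theorem pv_g2_eq (t : List Char) (w : String) (m : Option String) :
    pvG2 ((PySem.Dict.counter t).values.sum) (PySem.Dict.counter t) m w
      = pvSel (pvCB t) m w := by
  unfold pvG2 pvSel
  by_cases hcb : pvCB t w = true
  · have hcompl : pvCompl t w.toList := (pv_completesB_iff t w).mp hcb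
    have hca : (w.toList.foldl pvF (PySem.Dict.counter t)).size = 0 :=
      (pv_completesA_iff t w).mpr hcompl
    have hprune : ((PySem.Dict.counter t).values.sum) ≤ (w.length : Int) := by
      simpa [PySem.Str.len] using pv_prune t w hcompl
    rw [hcb]
    simp only [if_true]
    match m with
    | none =>
        simp only [Option.isSome_none, Bool.false_and, Bool.or_false]
        rw [if_neg (by simp [PySem.Str.len]; omega), if_pos hca]
        rfl
    | some x =>
        simp only [Option.isSome_some, Bool.true_and, Option.getD_some, pvMinStep]
        by_cases hlt : PySem.Str.len w < PySem.Str.len x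
        · have hlt' : (w.length : Int) < (x.length : Int) := by
            simpa [PySem.Str.len] using hlt
          rw [if_neg (by simp [PySem.Str.len]; omega), if_pos hca, if_pos hlt]
        · have hlt' : ¬ (w.length : Int) < (x.length : Int) := by
            simpa [PySem.Str.len] using hlt
          rw [if_pos (by simp [PySem.Str.len]; omega), if_neg hlt]
  · have hca : ¬ (w.toList.foldl pvF (PySem.Dict.counter t)).size = 0 := by
      intro hs
      exact hcb ((pv_completesB_iff t w).mpr ((pv_completesA_iff t w).mp hs))
    simp only [hcb, Bool.false_eq_true, if_false]
    split <;> rfl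

-- first match in the length-stable insertion equals one running-min step
theorem pv_find?_insertBy (p : String → Bool) (x : String) : ∀ (s : List String),
    s.Pairwise (fun a b => PySem.Str.len a ≤ PySem.Str.len b) →
    (PySem.List.insertBy (fun a b => decide (PySem.Str.len a < PySem.Str.len b)) x s).find? p
      = pvSel p (s.find? p) x := by
  intro s
  induction s with
  | nil =>
      intro _
      simp only [PySem.List.insertBy, pvSel, pvMinStep, List.find?_nil, List.find?_cons]
      by_cases hp : p x = true
      · rw [hp]; simp
      · simp only [Bool.not_eq_true] at hp
        rw [hp]; simp
  | cons a t ih =>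
      intro hs
      have hpair := (List.pairwise_cons.mp hs).1
      have htpair := (List.pairwise_cons.mp hs).2
      by_cases hb : decide (PySem.Str.len x < PySem.Str.len a) = true
      · have hins : PySem.List.insertBy (fun a b => decide (PySem.Str.len a < PySem.Str.len b)) x (a :: t)
            = x :: a :: t := by
          simp only [PySem.List.insertBy, hb, if_true]
        rw [hins]
        rw [List.find?_cons]
        by_cases hp : p x = true
        · rw [hp]
          unfold pvSel
          rw [hp]
          simp only [if_true]
          cases hf : (a :: t).find? p with
          | none => rfl
          | some y =>
              have hy : y ∈ a :: t := List.mem_of_find?_eq_some hf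
              have hay : PySem.Str.len a ≤ PySem.Str.len y := by
                rcases List.mem_cons.mp hy with h | h
                · subst h; exact le_refl _
                · exact hpair y h
              have hxy : PySem.Str.len x < PySem.Str.len y :=
                lt_of_lt_of_le (of_decide_eq_true hb) hay
              simp only [pvMinStep]
              rw [if_pos hxy]
        · simp only [Bool.not_eq_true] at hp
          rw [hp]
          unfold pvSel
          rw [hp]
          rfl
      · have hins : PySem.List.insertBy (fun a b => decide (PySem.Str.len a < PySem.Str.len b)) x (a :: t)
            = a :: PySem.List.insertBy (fun a b => decide (PySem.Str.len a < PySem.Str.len b)) x t := by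
          simp only [PySem.List.insertBy]
          rw [if_neg (by simpa using hb)]
        rw [hins, List.find?_cons, List.find?_cons]
        by_cases hpa : p a = true
        · rw [hpa]
          unfold pvSel
          by_cases hp : p x = true
          · rw [hp]
            simp only [if_true, pvMinStep]
            rw [if_neg (by simpa using hb)]
          · simp only [Bool.not_eq_true] at hp
            rw [hp]
            rfl
        · simp only [Bool.not_eq_true] at hpa
          rw [hpa]
          exact ih htpair

-- first match in the stable length-sort IS the pruned running-best loop's selection
theorem pv_find?_sorted (p : String → Bool) : ∀ (l : List String),
    (PySem.List.sorted l (fun w => PySem.Str.len w)).find? p = l.foldl (pvSel p) none := by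
  intro l
  induction l using List.reverseRecOn with
  | nil => rfl
  | append_singleton l x ih =>
      have hs : PySem.List.sorted (l ++ [x]) (fun w => PySem.Str.len w)
          = PySem.List.insertBy (fun a b => decide (PySem.Str.len a < PySem.Str.len b)) x
              (PySem.List.sorted l (fun w => PySem.Str.len w)) := by
        rw [PySem.List.sorted_eq_foldl_insertBy, PySem.List.sorted_eq_foldl_insertBy,
          List.foldl_append, List.foldl_cons, List.foldl_nil]
      rw [hs, List.foldl_append, List.foldl_cons, List.foldl_nil,
        pv_find?_insertBy p x _ (PySem.List.sorted_pairwise l (fun w => PySem.Str.len w)), ih]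

theorem find_spec' : ∀ (target : String) (words : List String),
    find target words = find_alt target words := by
  intro target words
  set t := pvT target with ht
  have hfind : find target words =
      (match (PySem.List.enumerate words).foldl
          (pvGA words ((PySem.Dict.counter t).values.sum) (PySem.Dict.counter t)) none with
        | some b => PySem.List.pyGet? words b
        | none => none) := rfl
  have halt : find_alt target words
      = (PySem.List.sorted words (fun w => PySem.Str.len w)).find? (pvCB t) := rfl
  have hrel := pv_loopA words ((PySem.Dict.counter t).values.sum) (PySem.Dict.counter t)
      (PySem.List.enumerate words) none none
      (by
        intro p hp
        have := pv_mem_enumerate words [] p (by simpa using hp)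
        simpa using this)
      trivial
  -- rewrite the m-side fold into B's selection fold
  have hm : (PySem.List.enumerate words).foldl
        (fun m p => pvG2 ((PySem.Dict.counter t).values.sum) (PySem.Dict.counter t) m p.2) none
      = words.foldl (pvSel (pvCB t)) none := by
    have step1 : (PySem.List.enumerate words).foldl
          (fun m p => pvG2 ((PySem.Dict.counter t).values.sum) (PySem.Dict.counter t) m p.2) none
        = (PySem.List.enumerate words).foldl
          (fun m p => pvSel (pvCB t) m p.2) none :=
      PySem.List.foldl_congr_mem _ _ _ _ (fun acc x _ => pv_g2_eq t x.2 acc)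
    rw [step1, ← List.foldl_map (f := fun p : Int × String => p.2)
        (g := pvSel (pvCB t)), pv_enumerate_map_snd]
  rw [hfind, halt, pv_find?_sorted]
  rw [hm] at hrel
  revert hrel
  set bfin := (PySem.List.enumerate words).foldl
      (pvGA words ((PySem.Dict.counter t).values.sum) (PySem.Dict.counter t)) none
  set mfin := words.foldl (pvSel (pvCB t)) none
  intro hrel
  match bfin, mfin, hrel with
  | none, none, _ => rfl
  | some j, some x, hjx => simpa using hjx

-- ===== VERDICT (by name: the statement is the Claim_ definition above) =====
theorem find_spec : Claim_equal_find := by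
  intro target words _
  unfold Spec_find
  exact find_spec' target words
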